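-- pv_equiv track=rewrite | github.com/maximilianogomez/Progra1 | Parciales/Parcial 1/parcial2.py | DigitoCentralImpar
-- ===== SOURCE A (Python) =====
-- def cantidadDigitos(num):
--     'Cuenta la cantidad de digitos'
--     cont = 0
--     while num > 0:
--         num //= 10
--         cont += 1
--     return cont
--
-- def DigitoCentralImpar(num):
--     'Halla el digito central y lo analiza para ver si es o no Impar'
--     digitos = cantidadDigitos(num)
--     central = digitos //2
--     for i in range(central):
--         num = num // 10
--     digito = num % 10
--     if digito % 2 != 0:
--         esImpar = True
--     else:
--         esImpar = False
--     return esImpar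
-- ===== SOURCE B (Python) =====
-- def DigitoCentralImpar(num):
--     'Halla el digito central y lo analiza para ver si es o no Impar'
--     L = []
--     n = num
--     while n > 0:
--         L.append(n % 10)
--         n //= 10
--     central = L[len(L) // 2] if L else num
--     return central % 2 != 0
-- ===== Notes on version B (the rewrite author's own statement) =====
-- stated objective: alternative
-- what changed: B materialises the digit sequence (LSB-first) in one pass and directly indexes the central digit L[len(L)//2], instead of A's count-the-digits loop followed by a second divide-down loop; the parity test collapses to central % 2 != 0 (for num <= 0 the list is empty and num's own parity is A's value, since (num%10)%2 == num%2).
import Mathlib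
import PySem

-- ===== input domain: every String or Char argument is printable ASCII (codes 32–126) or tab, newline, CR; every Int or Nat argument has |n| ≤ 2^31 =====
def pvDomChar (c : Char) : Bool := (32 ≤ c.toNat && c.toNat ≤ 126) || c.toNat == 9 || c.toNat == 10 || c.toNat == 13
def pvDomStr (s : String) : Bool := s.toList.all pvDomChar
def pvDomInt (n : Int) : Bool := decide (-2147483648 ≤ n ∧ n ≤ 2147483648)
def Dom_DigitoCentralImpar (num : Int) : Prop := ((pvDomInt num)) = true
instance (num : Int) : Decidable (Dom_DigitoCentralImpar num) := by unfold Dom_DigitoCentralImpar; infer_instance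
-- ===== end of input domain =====

-- B replaces A's count-then-divide-down two-loop scheme by one pass that builds the
-- LSB-first digit list and indexes its middle element (objective: alternative decomposition).

-- ===== PORT A =====
-- while num > 0: num //= 10; cont += 1
def cantLoop (num cont : Int) : Int :=
  if 0 < num then cantLoop (PySem.Int.floordiv num 10) (cont + 1) else cont
termination_by num.toNat
decreasing_by
  rw [PySem.Int.floordiv_eq_ediv_of_pos (by omega)]
  omega

def cantidadDigitos (num : Int) : Int := cantLoop num 0

def DigitoCentralImpar (num : Int) : Bool :=
  let digitos := cantidadDigitos num
  let central := PySem.Int.floordiv digitos 2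
  let num' := (PySem.List.pyRange 0 central 1).foldl (fun n _ => PySem.Int.floordiv n 10) num
  let digito := PySem.Int.mod num' 10
  if PySem.Int.mod digito 2 ≠ 0 then true else false

-- ===== PORT B =====
-- while n > 0: L.append(n % 10); n //= 10
def digitsLoop (n : Int) (L : List Int) : List Int :=
  if 0 < n then digitsLoop (PySem.Int.floordiv n 10) (L ++ [PySem.Int.mod n 10]) else L
termination_by n.toNat
decreasing_by
  rw [PySem.Int.floordiv_eq_ediv_of_pos (by omega)]
  omega

def DigitoCentralImpar_alt (num : Int) : Bool :=
  let L := digitsLoop num []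
  -- L[len(L)//2] if L else num; the index len(L)//2 is always in range for nonempty L
  let central := if L.isEmpty then num else PySem.List.pyGetD L (PySem.Int.floordiv (L.length : Int) 2) 0
  decide (PySem.Int.mod central 2 ≠ 0)

-- ===== PRECONDITION & SPEC =====
def Spec_DigitoCentralImpar (num : Int) (out : Bool) : Prop := out = DigitoCentralImpar_alt num
instance (num : Int) (out : Bool) : Decidable (Spec_DigitoCentralImpar num out) := by unfold Spec_DigitoCentralImpar; infer_instance

-- ===== CLAIM (what is proved, stated in full; the proofs are below) =====
def Claim_equal_DigitoCentralImpar : Prop := ∀ (num : Int), Dom_DigitoCentralImpar num → Spec_DigitoCentralImpar num (DigitoCentralImpar num)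

-- ===== LEMMAS AND PROOFS =====

-- the digit list built by B's loop with an empty accumulator
def digits (n : Int) : List Int := digitsLoop n []

lemma digitsLoop_acc (n : Int) (L : List Int) : digitsLoop n L = L ++ digitsLoop n [] := by
  by_cases h : 0 < n
  · conv_lhs => rw [digitsLoop, if_pos h,
      digitsLoop_acc (PySem.Int.floordiv n 10) (L ++ [PySem.Int.mod n 10])]
    conv_rhs => rw [digitsLoop, if_pos h,
      digitsLoop_acc (PySem.Int.floordiv n 10) ([] ++ [PySem.Int.mod n 10])]
    simp
  · conv_lhs => rw [digitsLoop, if_neg h]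
    conv_rhs => rw [digitsLoop, if_neg h]
    simp
termination_by n.toNat
decreasing_by
  all_goals rw [PySem.Int.floordiv_eq_ediv_of_pos (by omega)]; omega

lemma digits_pos {n : Int} (h : 0 < n) :
    digits n = PySem.Int.mod n 10 :: digits (PySem.Int.floordiv n 10) := by
  conv_lhs => rw [digits, digitsLoop, if_pos h,
    digitsLoop_acc (PySem.Int.floordiv n 10) ([] ++ [PySem.Int.mod n 10])]
  simp [digits]

lemma digits_nonpos {n : Int} (h : ¬ 0 < n) : digits n = [] := by
  rw [digits, digitsLoop, if_neg h]

lemma cantLoop_eq (n c : Int) : cantLoop n c = c + (digits n).length := by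
  induction n, c using cantLoop.induct with
  | case1 n c h ih =>
    rw [cantLoop, if_pos h, ih, digits_pos h]
    simp; omega
  | case2 n c h =>
    rw [cantLoop, if_neg h, digits_nonpos h]
    simp

-- A's kth divide-down step reads off the kth LSB digit
lemma digits_getD (k : Nat) : ∀ n : Int, k < (digits n).length →
    (digits n).getD k 0 = PySem.Int.mod ((fun x => PySem.Int.floordiv x 10)^[k] n) 10 := by
  induction k with
  | zero =>
    intro n hk
    by_cases h : 0 < n
    · rw [digits_pos h]; simp
    · rw [digits_nonpos h] at hk; simp at hk
  | succ k ih =>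
    intro n hk
    by_cases h : 0 < n
    · rw [digits_pos h] at hk ⊢
      simpa [Function.iterate_succ_apply] using ih (PySem.Int.floordiv n 10) (by simpa using hk)
    · rw [digits_nonpos h] at hk; simp at hk

lemma foldl_pyRange_iter (f : Int → Int) (m : Nat) (x : Int) :
    (PySem.List.pyRange 0 (m : Int) 1).foldl (fun n _ => f n) x = f^[m] x := by
  induction m with
  | zero => simp [PySem.List.pyRange_zero_nat]
  | succ m ih =>
    rw [show ((m + 1 : Nat) : Int) = (m : Int) + 1 by push_cast; ring,
      PySem.List.pyRange_one_succ_right (by omega), List.foldl_append]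
    simp [ih, Function.iterate_succ_apply']

theorem DigitoCentralImpar_spec : Claim_equal_DigitoCentralImpar := by
  intro num _
  unfold Spec_DigitoCentralImpar DigitoCentralImpar DigitoCentralImpar_alt cantidadDigitos
  have hdd : digitsLoop num [] = digits num := rfl
  simp only [cantLoop_eq, zero_add, hdd]
  by_cases h : 0 < num
  · have hne : digits num ≠ [] := by rw [digits_pos h]; simp
    have hlen : 0 < (digits num).length := List.length_pos_iff.mpr hne
    have hE : (digits num).isEmpty = false := by simp [hne]
    have hfd2 : PySem.Int.floordiv (((digits num).length : Nat) : Int) 2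
        = ((((digits num).length / 2 : Nat)) : Int) := by
      rw [PySem.Int.floordiv_eq_ediv_of_pos (by omega)]
      omega
    have hidx : (digits num).length / 2 < (digits num).length := by omega
    simp only [hfd2, foldl_pyRange_iter (fun x => PySem.Int.floordiv x 10), hE,
      Bool.false_eq_true, if_false, PySem.List.pyGetD_natCast]
    rw [List.getD_eq_getElem _ 0 hidx, ← List.getD_eq_getElem (digits num) 0 hidx,
      digits_getD _ num hidx]
    simp
  · have hz : digits num = [] := digits_nonpos h
    have h2 : PySem.Int.floordiv (0 : Int) 2 = 0 := by
      rw [PySem.Int.floordiv_eq_ediv_of_pos (by omega)]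
      rfl
    simp only [hz, List.length_nil, Nat.cast_zero, h2, PySem.List.pyRange_zero,
      Int.toNat_zero, List.range_zero, List.map_nil, List.foldl_nil, List.isEmpty_nil, if_pos]
    have hm10 : PySem.Int.mod num 10 = num % 10 := PySem.Int.mod_eq_emod_of_pos (by omega)
    have hm2 : ∀ a : Int, PySem.Int.mod a 2 = a % 2 := fun a => PySem.Int.mod_eq_emod_of_pos (by omega)
    rw [hm10, hm2, hm2]
    have hpar : num % 10 % 2 = num % 2 := by omega
    rw [hpar]
    simp
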